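-- pv_equiv track=rewrite | github.com/kartikgoel88/gen_ai_framework | src/clients/documents/parse_passport.py | _normalize_ocr_text
-- ===== SOURCE A (Python) =====
-- def _normalize_ocr_text(text: str) -> str:
--     """Collapse space-separated single characters so 'V 4 1 3 4 1 0 2' -> 'V4134102'. Helps when OCR outputs one char per token."""
--     if not text or not text.strip():
--         return text
--     tokens = text.split()
--     out: list[str] = []
--     i = 0
--     while i < len(tokens):
--         run = []
--         while i < len(tokens) and len(tokens[i]) == 1:
--             run.append(tokens[i])
--             i += 1
--         if run:
--             out.append("".join(run))
--         if i < len(tokens):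
--             out.append(tokens[i])
--             i += 1
--     return " ".join(out)
-- ===== SOURCE B (Python) =====
-- def _normalize_ocr_text(text: str) -> str:
--     """Collapse space-separated single characters so 'V 4 1 3 4 1 0 2' -> 'V4134102'."""
--     if not text or not text.strip():
--         return text
--     acc = ""
--     prev = None
--     for cur in text.split():
--         if prev is None:
--             acc = cur
--         elif len(prev) == 1 and len(cur) == 1:
--             acc += cur
--         else:
--             acc += " " + cur
--         prev = cur
--     return acc
-- ===== Notes on version B (the rewrite author's own statement) =====
-- stated objective: simpler
-- what changed: Replaced A's nested while-loops that build explicit runs and an output token list with a single linear fold over the tokens that keeps only the previous token and omits the joining space exactly when both neighbours are single characters.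
import Mathlib
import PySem

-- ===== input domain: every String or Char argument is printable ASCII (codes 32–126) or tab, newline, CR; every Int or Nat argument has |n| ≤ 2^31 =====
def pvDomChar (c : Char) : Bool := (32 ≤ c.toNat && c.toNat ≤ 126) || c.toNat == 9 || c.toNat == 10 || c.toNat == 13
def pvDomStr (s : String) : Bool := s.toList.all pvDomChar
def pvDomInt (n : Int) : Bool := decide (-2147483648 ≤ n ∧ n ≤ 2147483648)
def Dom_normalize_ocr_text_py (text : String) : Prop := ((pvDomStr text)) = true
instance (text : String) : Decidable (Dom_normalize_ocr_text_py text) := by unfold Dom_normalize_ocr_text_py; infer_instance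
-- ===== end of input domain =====

-- B replaces A's nested run-collecting while-loops by a single fold that tracks the previous
-- token and drops the joining space when both neighbours are single characters (simpler, same O(n)).

-- ===== PORT A =====
-- inner while loop of A: split off the leading run of single-character tokens
def pvTakeRun : List String → List String × List String
  | [] => ([], [])
  | t :: rest =>
    if PySem.Str.len t == 1 then
      (t :: (pvTakeRun rest).1, (pvTakeRun rest).2)
    else ([], t :: rest)

-- termination fact for the outer loop (cited by pvOutA's decreasing_by)
theorem pvTakeRun_snd_length : ∀ l : List String, (pvTakeRun l).2.length ≤ l.length := by
  intro l
  induction l with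
  | nil => simp [pvTakeRun]
  | cons t rest ih => simp only [pvTakeRun]; split <;> simp <;> omega

-- outer while loop of A, building the list `out`
def pvOutA : List String → List String
  | [] => []
  | t :: rest =>
    if PySem.Str.len t == 1 then
      match hh : (pvTakeRun rest).2 with
      | [] => [PySem.Str.join "" (t :: (pvTakeRun rest).1)]
      | u :: rem => PySem.Str.join "" (t :: (pvTakeRun rest).1) :: u :: pvOutA rem
    else t :: pvOutA rest
termination_by l => l.length
decreasing_by
  · have h := pvTakeRun_snd_length rest
    rw [hh] at h
    simp at h ⊢
    omega
  · simp

def normalize_ocr_text_py (text : String) : String :=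
  if text = "" ∨ PySem.Str.strip text = "" then text
  else PySem.Str.join " " (pvOutA (PySem.Str.split₀ text))

-- ===== PORT B =====
-- loop body of B; the accumulator string is carried as its char list (Python `acc += …` is exact list append)
def pvStepB (s : List Char × Option String) (cur : String) : List Char × Option String :=
  match s.2 with
  | none => (cur.toList, some cur)
  | some prev =>
    if PySem.Str.len prev == 1 && PySem.Str.len cur == 1 then (s.1 ++ cur.toList, some cur)
    else (s.1 ++ ' ' :: cur.toList, some cur)

def normalize_ocr_text_py_alt (text : String) : String :=
  if text = "" ∨ PySem.Str.strip text = "" then text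
  else String.ofList ((PySem.Str.split₀ text).foldl pvStepB ([], none)).1

-- ===== PRECONDITION & SPEC =====
def Spec_normalize_ocr_text_py (text : String) (out : String) : Prop := out = normalize_ocr_text_py_alt text
instance (text : String) (out : String) : Decidable (Spec_normalize_ocr_text_py text out) := by unfold Spec_normalize_ocr_text_py; infer_instance

-- ===== CLAIM (what is proved, stated in full; the proofs are below) =====
def Claim_equal_normalize_ocr_text_py : Prop := ∀ (text : String), Dom_normalize_ocr_text_py text → Spec_normalize_ocr_text_py text (normalize_ocr_text_py text)

-- ===== LEMMAS AND PROOFS =====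

-- the characters B appends after the first token, as a function of the previous token
def pvGlue : String → List String → List Char
  | _, [] => []
  | prev, c :: l =>
    (if PySem.Str.len prev == 1 && PySem.Str.len c == 1 then c.toList else ' ' :: c.toList) ++ pvGlue c l

theorem pvFoldB_glue (l : List String) : ∀ (acc : List Char) (prev : String),
    (l.foldl pvStepB (acc, some prev)).1 = acc ++ pvGlue prev l := by
  induction l with
  | nil => intro acc prev; simp [pvGlue]
  | cons c l ih =>
    intro acc prev
    simp only [List.foldl_cons, pvStepB, pvGlue]
    split <;> simp [ih, List.append_assoc]

theorem pvB_main (t : String) (rest : List String) :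
    ((t :: rest).foldl pvStepB ([], none)).1 = t.toList ++ pvGlue t rest := by
  simp only [List.foldl_cons, pvStepB]
  simpa using pvFoldB_glue rest t.toList t

theorem pvTakeRun_append : ∀ l : List String, (pvTakeRun l).1 ++ (pvTakeRun l).2 = l := by
  intro l
  induction l with
  | nil => simp [pvTakeRun]
  | cons t rest ih => simp only [pvTakeRun]; split <;> simp [ih]

theorem pvTakeRun_fst_single : ∀ (l : List String) (c : String), c ∈ (pvTakeRun l).1 →
    (PySem.Str.len c == 1) = true := by
  intro l
  induction l with
  | nil => simp [pvTakeRun]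
  | cons t rest ih =>
    intro c hc
    simp only [pvTakeRun] at hc
    split at hc
    · rcases List.mem_cons.mp hc with h | h
      · subst h; assumption
      · exact ih c h
    · simp at hc

theorem pvTakeRun_snd_head : ∀ (l : List String) (u : String) (rem : List String),
    (pvTakeRun l).2 = u :: rem → (PySem.Str.len u == 1) = false := by
  intro l
  induction l with
  | nil => simp [pvTakeRun]
  | cons t rest ih =>
    intro u rem h
    simp only [pvTakeRun] at h
    split at h
    · exact ih u rem h
    · rename_i hne
      simp at h
      rcases h with ⟨h1, _⟩
      subst h1
      simpa using hne

theorem pvOutA_ne_nil (t : String) (rest : List String) : pvOutA (t :: rest) ≠ [] := by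
  rw [pvOutA]
  split
  · split <;> simp
  · simp

-- glue over an all-single-character run is pure concatenation
theorem pvGlue_singles : ∀ (r : List String) (prev : String),
    (PySem.Str.len prev == 1) = true → (∀ c ∈ r, (PySem.Str.len c == 1) = true) →
    pvGlue prev r = PySem.Chars.join [] (r.map String.toList) := by
  intro r
  induction r with
  | nil => intro prev _ _; simp [pvGlue, PySem.Chars.join_nil]
  | cons c l ih =>
    intro prev hp hall
    have hc : (PySem.Str.len c == 1) = true := hall c (by simp)
    have hl : ∀ x ∈ l, (PySem.Str.len x == 1) = true := fun x hx => hall x (by simp [hx])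
    simp only [pvGlue, hp, hc, Bool.and_self, if_pos, List.map_cons]
    rw [ih c hc hl]
    cases l with
    | nil => simp [PySem.Chars.join_nil, PySem.Chars.join_singleton]
    | cons d l' => simp [PySem.Chars.join_cons_cons]

theorem pvGlue_run : ∀ (r : List String) (prev u : String) (rem : List String),
    (PySem.Str.len prev == 1) = true → (∀ c ∈ r, (PySem.Str.len c == 1) = true) →
    (PySem.Str.len u == 1) = false →
    pvGlue prev (r ++ u :: rem) =
      PySem.Chars.join [] (r.map String.toList) ++ ' ' :: u.toList ++ pvGlue u rem := by
  intro r
  induction r with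
  | nil =>
    intro prev u rem _ _ hu
    have hu' : ¬ u.length = 1 := by simpa using hu
    simp [pvGlue, hu', PySem.Chars.join_nil]
  | cons c l ih =>
    intro prev u rem hp hall hu
    have hc : (PySem.Str.len c == 1) = true := hall c (by simp)
    have hl : ∀ x ∈ l, (PySem.Str.len x == 1) = true := fun x hx => hall x (by simp [hx])
    simp only [List.cons_append, pvGlue, hp, hc, Bool.and_self, if_pos, List.map_cons]
    rw [ih c u rem hc hl hu]
    cases l with
    | nil => simp [PySem.Chars.join_nil, PySem.Chars.join_singleton]
    | cons d l' => simp [PySem.Chars.join_cons_cons]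

theorem pvA_main : ∀ (n : Nat) (t : String) (rest : List String), (t :: rest).length ≤ n →
    PySem.Chars.join [' '] ((pvOutA (t :: rest)).map String.toList) = t.toList ++ pvGlue t rest := by
  intro n
  induction n with
  | zero => intro t rest h; simp at h
  | succ n ih =>
    intro t rest hlen
    rw [pvOutA]
    by_cases ht : (PySem.Str.len t == 1) = true
    · rw [if_pos ht]
      have happ := pvTakeRun_append rest
      have hsingle := pvTakeRun_fst_single rest
      split
      · rename_i hh
        have happ2 : (pvTakeRun rest).1 = rest := by
          conv_rhs => rw [← happ, hh]
          simp
        have hall : ∀ c ∈ rest, (PySem.Str.len c == 1) = true := by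
          intro c hc; exact hsingle c (by rw [happ2]; exact hc)
        simp only [List.map_cons, List.map_nil, PySem.Chars.join_singleton]
        rw [PySem.Str.toList_join, happ2]
        simp only [List.map_cons]
        rw [pvGlue_singles rest t ht hall]
        cases rest with
        | nil => simp [PySem.Chars.join_nil, PySem.Chars.join_singleton]
        | cons d l' => simp [PySem.Chars.join_cons_cons]
      · rename_i u rem hh
        have hu : (PySem.Str.len u == 1) = false := pvTakeRun_snd_head rest u rem hh
        have hrest : rest = (pvTakeRun rest).1 ++ u :: rem := by rw [← hh, happ]
        have houtA : pvOutA (u :: rem) = u :: pvOutA rem := by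
          rw [pvOutA, if_neg (by simpa using hu)]
        have hlen' : (u :: rem).length ≤ n := by
          have h1 : rest.length ≤ n := by simpa using hlen
          have h2 := congrArg List.length hrest
          simp only [List.length_append, List.length_cons] at h2
          simp at h2 ⊢
          omega
        have hih := ih u rem hlen'
        rw [houtA] at hih
        simp only [List.map_cons]
        rw [show PySem.Chars.join [' '] ((PySem.Str.join "" (t :: (pvTakeRun rest).1)).toList :: String.toList u :: (pvOutA rem).map String.toList) = (PySem.Str.join "" (t :: (pvTakeRun rest).1)).toList ++ ' ' :: PySem.Chars.join [' '] (String.toList u :: (pvOutA rem).map String.toList) from by simp [PySem.Chars.join_cons_cons]]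
        simp only [List.map_cons] at hih
        rw [hih]
        rw [PySem.Str.toList_join]
        simp only [List.map_cons]
        rw [show pvGlue t rest = pvGlue t ((pvTakeRun rest).1 ++ u :: rem) from by rw [← hrest]]
        rw [pvGlue_run _ t u rem ht hsingle hu]
        cases h1 : (pvTakeRun rest).1 with
        | nil => simp [PySem.Chars.join_nil, PySem.Chars.join_singleton, List.append_assoc]
        | cons d l' =>
          simp [show ("" : String).toList = ([] : List Char) from by decide,
                PySem.Chars.join_cons_cons, List.append_assoc]
    · rw [if_neg ht]
      cases rest with
      | nil => simp [pvOutA, pvGlue, PySem.Chars.join_singleton]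
      | cons u rest' =>
        have hne := pvOutA_ne_nil u rest'
        have hlen' : (u :: rest').length ≤ n := by simp at hlen ⊢; omega
        have hih := ih u rest' hlen'
        obtain ⟨x, xs, hx⟩ : ∃ x xs, pvOutA (u :: rest') = x :: xs := by
          cases hcase : pvOutA (u :: rest') with
          | nil => exact absurd hcase hne
          | cons x xs => exact ⟨x, xs, rfl⟩
        rw [hx] at hih ⊢
        simp only [List.map_cons]
        rw [show PySem.Chars.join [' '] (String.toList t :: String.toList x :: xs.map String.toList) = String.toList t ++ ' ' :: PySem.Chars.join [' '] (String.toList x :: xs.map String.toList) from by simp [PySem.Chars.join_cons_cons]]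
        simp only [List.map_cons] at hih
        rw [hih]
        have ht' : ¬ t.length = 1 := by simpa using ht
        simp [pvGlue, ht', List.append_assoc]

-- ===== VERDICT (by name: the statement is the Claim_ definition above) =====
theorem normalize_ocr_text_py_spec : Claim_equal_normalize_ocr_text_py := by
  intro text _
  unfold Spec_normalize_ocr_text_py normalize_ocr_text_py normalize_ocr_text_py_alt
  split
  · rfl
  · apply String.toList_injective
    rw [String.toList_ofList]
    cases hts : PySem.Str.split₀ text with
    | nil => simp [pvOutA, PySem.Str.toList_join, PySem.Chars.join_nil]
    | cons t rest =>
      rw [PySem.Str.toList_join]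
      have hsep : (" ").toList = [' '] := by decide
      rw [hsep]
      rw [pvA_main ((t :: rest).length) t rest (le_refl _)]
      rw [pvB_main t rest]
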